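-- pv_equiv track=rewrite | github.com/SCLemon/CPE_package | 必考 49 題（UVA驗證）/必考 49 題 Python 參考答案一/10409.py | solve
-- ===== SOURCE A (Python) =====
-- def solve(codes):
--     # "east"、"south"、"west"、"north"。
--     '''
--            2
--         3  1  4  6
--            5
--     '''
--     north, west, top = 2, 3, 1
--     for code in codes:
--         if code == 'east':
--             north, west, top = north, 7 - top, west
--         elif code == 'south':
--             north, west, top = 7 - top, west, north
--         elif code == 'west':
--             north, west, top = north, top, 7 - west
--         else: # north
--             north, west, top = top, west, 7 - north
--     return top
-- ===== SOURCE B (Python) =====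
-- # Table-driven six-face die: each roll is a fixed permutation of the face tuple.
-- PERM = {
--     'east':  (2, 1, 3, 5, 4, 0),
--     'south': (1, 3, 2, 4, 0, 5),
--     'west':  (5, 1, 0, 2, 4, 3),
-- }
-- NORTH_PERM = (4, 0, 2, 1, 3, 5)
--
-- def solve(codes):
--     # faces = (top, north, west, bottom, south, east)
--     faces = (1, 2, 3, 6, 5, 4)
--     for code in codes:
--         p = PERM.get(code, NORTH_PERM)
--         faces = tuple(faces[i] for i in p)
--     return faces[0]
-- ===== Notes on version B (the rewrite author's own statement) =====
-- stated objective: idiomatic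
-- what changed: B keeps the full six-face tuple and applies each roll as a fixed index permutation looked up in a table (dict of permutations with a default), instead of A's three tracked faces with 7-x complement arithmetic in per-direction branches.
import Mathlib
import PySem

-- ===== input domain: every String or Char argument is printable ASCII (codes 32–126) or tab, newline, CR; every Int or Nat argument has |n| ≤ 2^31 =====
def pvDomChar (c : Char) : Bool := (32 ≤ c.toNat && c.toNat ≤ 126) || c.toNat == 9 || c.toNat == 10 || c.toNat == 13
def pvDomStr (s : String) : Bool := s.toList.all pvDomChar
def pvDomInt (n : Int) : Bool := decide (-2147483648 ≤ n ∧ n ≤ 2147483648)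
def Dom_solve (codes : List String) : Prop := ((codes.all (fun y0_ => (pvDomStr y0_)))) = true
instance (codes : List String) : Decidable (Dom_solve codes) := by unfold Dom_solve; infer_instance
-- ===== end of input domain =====

-- B replaces A's three-face 7-x complement tracking with a table-driven six-face permutation per roll (idiomatic; same O(n) cost).

-- ===== PORT A =====
def solve (codes : List String) : Int :=
  let st := codes.foldl (fun (s : Int × Int × Int) code =>
    let north := s.1; let west := s.2.1; let top := s.2.2
    if code = "east" then (north, 7 - top, west)
    else if code = "south" then (7 - top, west, north)
    else if code = "west" then (north, top, 7 - west)
    else (top, west, 7 - north)) (2, 3, 1)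
  st.2.2

-- ===== PORT B =====
-- rotation tables: new face i = old face p[i]; faces = [top, north, west, bottom, south, east]
def pvPERM : PySem.Dict String (List Nat) :=
  ⟨[("east", [2, 1, 3, 5, 4, 0]), ("south", [1, 3, 2, 4, 0, 5]), ("west", [5, 1, 0, 2, 4, 3])]⟩

def pvNORTH : List Nat := [4, 0, 2, 1, 3, 5]

-- faces[i] ported via pyGet? with default 0 (indices 0–5 always in range on the 6-face tuple)
def solve_alt (codes : List String) : Int :=
  let faces := codes.foldl (fun (faces : List Int) code =>
    let p := PySem.Dict.getD pvPERM code pvNORTH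
    p.map (fun i => (PySem.List.pyGet? faces (Int.ofNat i)).getD 0)) [1, 2, 3, 6, 5, 4]
  (PySem.List.pyGet? faces 0).getD 0

-- ===== PRECONDITION & SPEC =====
def Spec_solve (codes : List String) (out : Int) : Prop := out = solve_alt codes
instance (codes : List String) (out : Int) : Decidable (Spec_solve codes out) := by unfold Spec_solve; infer_instance

-- ===== CLAIM (what is proved, stated in full; the proofs are below) =====
def Claim_equal_solve : Prop := ∀ (codes : List String), Dom_solve codes → Spec_solve codes (solve codes)

-- ===== LEMMAS AND PROOFS =====
-- loop invariant: B's six-face list is [t, n, w, 7-t, 7-n, 7-w] when A's state is (n, w, t)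
lemma solve_inv (codes : List String) (n w t : Int) :
    codes.foldl (fun (faces : List Int) code =>
        let p := PySem.Dict.getD pvPERM code pvNORTH
        p.map (fun i => (PySem.List.pyGet? faces (Int.ofNat i)).getD 0))
      [t, n, w, 7 - t, 7 - n, 7 - w]
    = (fun (s : Int × Int × Int) => [s.2.2, s.1, s.2.1, 7 - s.2.2, 7 - s.1, 7 - s.2.1])
        (codes.foldl (fun (s : Int × Int × Int) code =>
          let north := s.1; let west := s.2.1; let top := s.2.2
          if code = "east" then (north, 7 - top, west)
          else if code = "south" then (7 - top, west, north)
          else if code = "west" then (north, top, 7 - west)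
          else (top, west, 7 - north)) (n, w, t)) := by
  induction codes generalizing n w t with
  | nil => simp
  | cons c cs ih =>
    simp only [List.foldl_cons]
    by_cases h1 : c = "east"
    · subst h1
      have h2 : (7 : Int) - (7 - t) = t := by ring
      simpa [pvPERM, pvNORTH, PySem.Dict.get?_mk_cons, PySem.Dict.getD, PySem.Dict.get?, PySem.List.pyGet?,
        PySem.List.pyIdx?, h2] using ih n (7 - t) w
    · by_cases h2 : c = "south"
      · subst h2
        have h3 : (7 : Int) - (7 - t) = t := by ring
        simpa [pvPERM, pvNORTH, PySem.Dict.get?_mk_cons, PySem.Dict.getD, PySem.Dict.get?, PySem.List.pyGet?,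
          PySem.List.pyIdx?, h1, h3] using ih (7 - t) w n
      · by_cases h3 : c = "west"
        · subst h3
          have h4 : (7 : Int) - (7 - w) = w := by ring
          simpa [pvPERM, pvNORTH, PySem.Dict.get?_mk_cons, PySem.Dict.getD, PySem.Dict.get?, PySem.List.pyGet?,
            PySem.List.pyIdx?, h1, h2, h4] using ih n t (7 - w)
        · have h4 : (7 : Int) - (7 - n) = n := by ring
          have e1 : (("east" : String) == c) = false := beq_eq_false_iff_ne.mpr (Ne.symm h1)
          have e2 : (("south" : String) == c) = false := beq_eq_false_iff_ne.mpr (Ne.symm h2)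
          have e3 : (("west" : String) == c) = false := beq_eq_false_iff_ne.mpr (Ne.symm h3)
          simpa [pvPERM, pvNORTH, PySem.Dict.get?_mk_cons, List.find?, e1, e2, e3, PySem.Dict.getD, PySem.Dict.get?, PySem.List.pyGet?,
            PySem.List.pyIdx?, h1, h2, h3, h4] using ih t w (7 - n)

-- ===== VERDICT (by name: the statement is the Claim_ definition above) =====
theorem solve_spec : Claim_equal_solve := by
  intro codes _
  unfold Spec_solve solve solve_alt
  have h0 : ([1, 2, 3, 6, 5, 4] : List Int) = [1, 2, 3, 7 - 1, 7 - 2, 7 - 3] := by norm_num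
  rw [h0, solve_inv codes 2 3 1]
  simp [PySem.List.pyGet?, PySem.List.pyIdx?]
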